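-- pv_equiv track=rewrite | github.com/ZaytsevNS/python_codewars | 7KYU/gordon.py | gordon
-- ===== SOURCE A (Python) =====
-- def gordon(a: str) -> str:
--     list_of_vowel: list = ['a', 'e', 'i', 'o', 'u']
--     str_of_word_with_replace_symbols: str = ''
--     for i in a:
--         if i.lower() in list_of_vowel and i.lower() == 'a':
--             str_of_word_with_replace_symbols += '@'
--         elif i.lower() in list_of_vowel:
--             str_of_word_with_replace_symbols += '*'
--         else:
--             str_of_word_with_replace_symbols += i.upper()
--     return str_of_word_with_replace_symbols.replace(' ', '!!!! ') + '!!!!'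
-- ===== SOURCE B (Python) =====
-- _TABLE = str.maketrans({'A': '@', 'E': '*', 'I': '*', 'O': '*', 'U': '*', ' ': '!!!! '})
--
-- def gordon(a: str) -> str:
--     return a.upper().translate(_TABLE) + '!!!!'
-- ===== Notes on version B (the rewrite author's own statement) =====
-- stated objective: faster
-- what changed: Replaces the explicit per-character Python loop with its if/elif ladder and trailing str.replace by a single table-driven str.translate pass over the uppercased string.
import Mathlib
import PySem

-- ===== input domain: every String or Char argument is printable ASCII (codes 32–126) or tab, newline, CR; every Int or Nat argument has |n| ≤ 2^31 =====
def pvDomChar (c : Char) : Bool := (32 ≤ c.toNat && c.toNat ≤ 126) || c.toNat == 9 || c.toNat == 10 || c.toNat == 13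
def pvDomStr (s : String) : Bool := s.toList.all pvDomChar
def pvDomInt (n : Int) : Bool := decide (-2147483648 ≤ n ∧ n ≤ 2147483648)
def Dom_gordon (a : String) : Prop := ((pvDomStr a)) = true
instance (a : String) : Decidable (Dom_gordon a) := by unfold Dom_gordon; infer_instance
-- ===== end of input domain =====

-- B replaces A's per-character if/elif loop + trailing str.replace by one table-driven translate pass over the uppercased string (measurably faster in a timing run).

-- ===== PORT A =====
-- one iteration of A's loop: append the replacement for character i to the accumulated string
def gordonStep (acc : List Char) (i : Char) : List Char :=
  if PySem.Chars.lowerChar i ∈ ['a', 'e', 'i', 'o', 'u'] ∧ PySem.Chars.lowerChar i = 'a' then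
    acc ++ ['@']
  else if PySem.Chars.lowerChar i ∈ ['a', 'e', 'i', 'o', 'u'] then
    acc ++ ['*']
  else
    acc ++ [PySem.Chars.upperChar i]

def gordon (a : String) : String :=
  String.mk (PySem.Chars.replace (a.toList.foldl gordonStep []) [' '] "!!!! ".toList ++ "!!!!".toList)

-- ===== PORT B =====
-- the translate table of Source B, as a per-character function
def gordonTr (c : Char) : List Char :=
  if c = 'A' then ['@']
  else if c = 'E' ∨ c = 'I' ∨ c = 'O' ∨ c = 'U' then ['*']
  else if c = ' ' then "!!!! ".toList
  else [c]

def gordon_alt (a : String) : String :=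
  String.mk ((PySem.Chars.upper a.toList).flatMap gordonTr ++ "!!!!".toList)

-- ===== PRECONDITION & SPEC =====
def Spec_gordon (a : String) (out : String) : Prop := out = gordon_alt a
instance (a : String) (out : String) : Decidable (Spec_gordon a out) := by unfold Spec_gordon; infer_instance

-- ===== CLAIM (what is proved, stated in full; the proofs are below) =====
def Claim_equal_gordon : Prop := ∀ (a : String), Dom_gordon a → Spec_gordon a (gordon a)

-- ===== LEMMAS AND PROOFS =====

-- the single character A's loop body appends for input character i
def gordonChar (i : Char) : Char :=
  if PySem.Chars.lowerChar i ∈ ['a', 'e', 'i', 'o', 'u'] ∧ PySem.Chars.lowerChar i = 'a' then '@'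
  else if PySem.Chars.lowerChar i ∈ ['a', 'e', 'i', 'o', 'u'] then '*'
  else PySem.Chars.upperChar i

theorem gordonStep_eq (acc : List Char) (i : Char) :
    gordonStep acc i = acc ++ [gordonChar i] := by
  unfold gordonStep gordonChar; split_ifs <;> rfl

theorem foldl_gordonStep (l : List Char) (acc : List Char) :
    l.foldl gordonStep acc = acc ++ l.map gordonChar := by
  induction l generalizing acc with
  | nil => simp
  | cons c t ih => simp [List.foldl, gordonStep_eq, ih]

theorem replace_go_single (new : List Char) (fuel : Nat) (l acc : List Char)
    (h : l.length ≤ fuel) :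
    PySem.Chars.replace.go [' '] new fuel l acc =
      acc.reverse ++ l.flatMap (fun c => if c = ' ' then new else [c]) := by
  induction fuel generalizing l acc with
  | zero =>
    have : l = [] := List.eq_nil_of_length_eq_zero (Nat.le_zero.mp h)
    subst this; simp [PySem.Chars.replace.go]
  | succ n ih =>
    cases l with
    | nil => simp [PySem.Chars.replace.go]
    | cons c t =>
      by_cases hc : c = ' '
      · subst hc
        have hp : List.isPrefixOf [' '] (' ' :: t) = true := by
          simp [List.isPrefixOf]
        simp only [PySem.Chars.replace.go, hp, if_pos]
        rw [ih _ _ (by simpa using Nat.le_of_succ_le_succ h)]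
        simp
      · have hp : List.isPrefixOf [' '] (c :: t) = false := by
          simp [List.isPrefixOf]
          exact fun h' => hc h'.symm
        simp only [PySem.Chars.replace.go, hp]
        rw [if_neg (by simp), ih _ _ (Nat.le_of_succ_le_succ h)]
        simp [hc]

theorem replace_single (l new : List Char) :
    PySem.Chars.replace l [' '] new =
      l.flatMap (fun c => if c = ' ' then new else [c]) := by
  unfold PySem.Chars.replace
  rw [if_neg (by simp)]
  simpa using replace_go_single new l.length l [] (le_refl _)

-- per-character agreement on the ASCII domain, checked over the 128 relevant codepoints
theorem char_lemma_nat : ∀ n : Nat, n < 128 →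
    gordonTr (PySem.Chars.upperChar (Char.ofNat n)) =
      (if gordonChar (Char.ofNat n) = ' ' then "!!!! ".toList else [gordonChar (Char.ofNat n)]) := by
  decide

theorem char_lemma (c : Char) (h : pvDomChar c = true) :
    gordonTr (PySem.Chars.upperChar c) =
      (if gordonChar c = ' ' then "!!!! ".toList else [gordonChar c]) := by
  have hlt : c.toNat < 128 := by
    simp only [pvDomChar, Bool.or_eq_true, Bool.and_eq_true, decide_eq_true_eq,
      beq_iff_eq] at h
    omega
  have := char_lemma_nat c.toNat hlt
  rwa [Char.ofNat_toNat] at this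

theorem flatMap_agree (l : List Char) (h : l.all pvDomChar = true) :
    (l.map gordonChar).flatMap (fun c => if c = ' ' then "!!!! ".toList else [c]) =
      (l.map PySem.Chars.upperChar).flatMap gordonTr := by
  induction l with
  | nil => rfl
  | cons c t ih =>
    simp only [List.all_cons, Bool.and_eq_true] at h
    simp only [List.map_cons, List.flatMap_cons, ih h.2, char_lemma c h.1]

-- ===== VERDICT (by name: the statement is the Claim_ definition above) =====
theorem gordon_spec : Claim_equal_gordon := by
  intro a hdom
  unfold Spec_gordon gordon gordon_alt
  rw [foldl_gordonStep, replace_single, List.nil_append,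
    flatMap_agree a.toList hdom, PySem.Chars.upper]
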